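-- pv_equiv track=rewrite | github.com/Vito-Chant/GDesigner | GDesigner/CoRe/belief_evolver.py | _extract_belief_statement
-- ===== SOURCE A (Python) =====
-- def _extract_belief_statement(response: str) -> str:
--     """从 LLM 响应提取信念陈述"""
--     for line in response.split('\n'):
--         if line.strip().startswith('BELIEF:'):
--             return line.replace('BELIEF:', '').strip()
--
--     for line in response.split('\n'):
--         if line.strip():
--             return line.strip()
--
--     return "Capability assessment updated"
-- ===== SOURCE B (Python) =====
-- def _extract_belief_statement(response: str) -> str:
--     fallback = None
--     for line in response.split('\n'):
--         s = line.strip()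
--         if s.startswith('BELIEF:'):
--             return line.replace('BELIEF:', '').strip()
--         if fallback is None and s:
--             fallback = s
--     return fallback if fallback is not None else "Capability assessment updated"
-- ===== Notes on version B (the rewrite author's own statement) =====
-- stated objective: alternative
-- what changed: Replaces A's two sequential scans of the split lines by a single pass that returns immediately on a BELIEF line and records the first non-empty stripped line as fallback.
import Mathlib
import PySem

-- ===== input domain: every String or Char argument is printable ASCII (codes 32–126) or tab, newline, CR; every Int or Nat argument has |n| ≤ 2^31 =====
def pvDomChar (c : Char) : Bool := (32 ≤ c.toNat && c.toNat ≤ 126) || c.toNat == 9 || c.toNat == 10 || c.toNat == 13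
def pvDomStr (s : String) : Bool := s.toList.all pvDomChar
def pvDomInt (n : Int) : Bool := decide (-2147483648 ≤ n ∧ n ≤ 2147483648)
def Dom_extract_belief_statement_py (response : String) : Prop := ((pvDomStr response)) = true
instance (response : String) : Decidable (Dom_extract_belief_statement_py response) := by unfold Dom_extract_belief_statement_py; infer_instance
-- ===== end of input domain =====

-- B collapses A's two sequential scans into one pass that keeps a fallback candidate; return values are identical.

-- ===== PORT A =====
-- first loop of A: return the stripped BELIEF line (with 'BELIEF:' removed) for the first matching line
def pvLoopA1 : List String → Option String
  | [] => none
  | l :: rest =>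
      if PySem.Str.startswith (PySem.Str.strip l) "BELIEF:" then
        some (PySem.Str.strip (PySem.Str.replace l "BELIEF:" ""))
      else pvLoopA1 rest

-- second loop of A: return the first non-empty stripped line
def pvLoopA2 : List String → Option String
  | [] => none
  | l :: rest =>
      if PySem.Str.strip l ≠ "" then some (PySem.Str.strip l)
      else pvLoopA2 rest

def extract_belief_statement_py (response : String) : String :=
  let lines := (PySem.Str.split? response "\n").getD []
  match pvLoopA1 lines with
  | some v => v
  | none =>
    match pvLoopA2 lines with
    | some v => v
    | none => "Capability assessment updated"

-- ===== PORT B =====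
-- single pass: immediate return on a BELIEF line, otherwise remember the first non-empty stripped line
def pvLoopB : List String → Option String → String
  | [], cand => match cand with
    | some c => c
    | none => "Capability assessment updated"
  | l :: rest, cand =>
      let s := PySem.Str.strip l
      if PySem.Str.startswith s "BELIEF:" then
        PySem.Str.strip (PySem.Str.replace l "BELIEF:" "")
      else if cand.isNone ∧ s ≠ "" then pvLoopB rest (some s)
      else pvLoopB rest cand

def extract_belief_statement_py_alt (response : String) : String :=
  pvLoopB ((PySem.Str.split? response "\n").getD []) none

-- ===== PRECONDITION & SPEC =====
def Spec_extract_belief_statement_py (response : String) (out : String) : Prop := out = extract_belief_statement_py_alt response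
instance (response : String) (out : String) : Decidable (Spec_extract_belief_statement_py response out) := by unfold Spec_extract_belief_statement_py; infer_instance

-- ===== CLAIM (what is proved, stated in full; the proofs are below) =====
def Claim_equal_extract_belief_statement_py : Prop := ∀ (response : String), Dom_extract_belief_statement_py response → Spec_extract_belief_statement_py response (extract_belief_statement_py response)

-- ===== LEMMAS AND PROOFS =====
theorem pvLoopB_eq (lines : List String) (cand : Option String) :
    pvLoopB lines cand =
      match pvLoopA1 lines with
      | some v => v
      | none =>
        match cand with
        | some c => c
        | none =>
          match pvLoopA2 lines with
          | some v => v
          | none => "Capability assessment updated" := by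
  induction lines generalizing cand with
  | nil => cases cand <;> simp [pvLoopB, pvLoopA1, pvLoopA2]
  | cons l rest ih =>
    simp only [pvLoopB, pvLoopA1, pvLoopA2]
    by_cases hb : PySem.Str.startswith (PySem.Str.strip l) "BELIEF:" = true
    · rw [if_pos hb, if_pos hb]
    · rw [if_neg hb, if_neg hb]
      cases cand with
      | some c =>
        rw [if_neg (by simp)]
        rw [ih]
      | none =>
        by_cases hs : PySem.Str.strip l = ""
        · rw [if_neg (by simp [hs]), if_neg (by simp [hs]), ih]
        · rw [if_pos ⟨by simp, hs⟩, if_pos hs, ih]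

-- ===== VERDICT (by name: the statement is the Claim_ definition above) =====
theorem extract_belief_statement_py_spec : Claim_equal_extract_belief_statement_py := by
  intro response _
  unfold Spec_extract_belief_statement_py extract_belief_statement_py extract_belief_statement_py_alt
  rw [pvLoopB_eq]
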